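-- pv_equiv track=rewrite | github.com/MohamedAmaan/leetcode | 3645-maximize-the-number-of-target-nodes-after-connecting-trees-ii/maximize-the-number-of-target-nodes-after-connecting-trees-ii.py | bfs
-- ===== SOURCE A (Python) =====
-- from collections import deque
--
-- def bfs(start, adj, included=None):
--     q = deque()
--     q.append((start, -1))
--     count = 0
--     level = 0
--
--     while q:
--         size = len(q)
--         if level % 2 == 0:
--             count += size
--
--         for _ in range(size):
--             curr, parent = q.popleft()
--             if included is not None and level % 2 == 0:
--                 included[curr] = True
--             for v in adj[curr]:
--                 if v == parent:
--                     continue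
--                 q.append((v, curr))
--         level += 1
--     return count
-- ===== SOURCE B (Python) =====
-- def bfs(start, adj, included=None):
--     count = 0
--     stack = [(start, -1, 0)]
--     while stack:
--         node, parent, depth = stack.pop()
--         if depth % 2 == 0:
--             count += 1
--             if included is not None:
--                 included[node] = True
--         for v in adj[node]:
--             if v != parent:
--                 stack.append((v, node, depth + 1))
--     return count
-- ===== Notes on version B (the rewrite author's own statement) =====
-- stated objective: alternative
-- what changed: Replaces the level-batched deque BFS (frontier size + level counter) with an iterative DFS over an explicit stack of (node, parent, depth) triples, classifying each node by its own carried depth parity; …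
-- outside the precondition, e.g. on bfs(0, [[], [99]], None): A returns 1, B returns 1; on bfs(-1, [[0]], None): A returns 2, B returns 2
import Mathlib
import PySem

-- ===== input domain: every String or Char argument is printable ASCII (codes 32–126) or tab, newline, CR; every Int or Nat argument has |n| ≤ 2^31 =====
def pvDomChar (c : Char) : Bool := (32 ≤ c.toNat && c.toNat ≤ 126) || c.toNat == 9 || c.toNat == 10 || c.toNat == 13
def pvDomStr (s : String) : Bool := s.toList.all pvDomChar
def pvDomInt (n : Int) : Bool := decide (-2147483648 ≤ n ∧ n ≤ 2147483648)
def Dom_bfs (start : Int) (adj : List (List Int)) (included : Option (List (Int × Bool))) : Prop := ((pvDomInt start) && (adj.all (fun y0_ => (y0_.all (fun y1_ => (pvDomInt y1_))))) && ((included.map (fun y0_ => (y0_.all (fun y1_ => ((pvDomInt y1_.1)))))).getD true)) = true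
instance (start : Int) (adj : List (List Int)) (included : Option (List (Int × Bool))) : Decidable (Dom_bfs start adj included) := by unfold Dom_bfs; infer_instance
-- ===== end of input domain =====

-- B replaces A's level-batched BFS (deque + frontier-size + level counter) with an iterative DFS over an
-- explicit stack of (node, parent, depth) triples, classifying each node by its own carried depth parity.
-- Both Pythons mutate the optional `included` dict (same keys: the even-depth nodes; insertion ORDER differs,
-- BFS order in A vs DFS order in B); the equivalence proved here is about the RETURN value only.

-- ===== PORT A =====
-- 'for v in adj[curr]: if v == parent: continue; q.append((v, curr))'
def bfsKids (adj : List (List Int)) (c p : Int) : List (Int × Int) :=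
  ((PySem.List.pyGet? adj c).getD []).foldl (fun acc v => if v = p then acc else acc ++ [(v, c)]) []

-- the 'while q:' loop; fuel = number of levels (adj.length + 1 suffices on Pre_, where the traversal
-- reaches depth at most adj.length); the inner for-loop over the current level is the foldl
def bfsLoop (adj : List (List Int)) : Nat → List (Int × Int) → Int → Nat → Int
  | 0, _, count, _ => count
  | fuel+1, q, count, level =>
    if q.isEmpty then count
    else
      bfsLoop adj fuel (q.foldl (fun acc cp => acc ++ bfsKids adj cp.1 cp.2) [])
        (if level % 2 = 0 then count + (q.length : Int) else count) (level + 1)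

def bfs (start : Int) (adj : List (List Int)) (included : Option (List (Int × Bool))) : Int :=
  bfsLoop adj (adj.length + 1) [(start, -1)] 0 0

-- ===== PORT B =====
-- 'while stack: node,parent,depth = stack.pop(); …; for v in adj[node]: if v != parent: stack.append(…)'
-- stack head = top; fuel = number of pops ((maxdeg+1)^(n+1) bounds the unfolding size on Pre_)
def dfsLoop (adj : List (List Int)) : Nat → List (Int × Int × Nat) → Int → Int
  | 0, _, count => count
  | fuel+1, stack, count =>
    match stack with
    | [] => count
    | (node, parent, depth) :: rest =>
      dfsLoop adj fuel
        (((PySem.List.pyGet? adj node).getD []).foldl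
          (fun st v => if v ≠ parent then (v, node, depth + 1) :: st else st) rest)
        (if depth % 2 = 0 then count + 1 else count)

def pvMaxDeg (adj : List (List Int)) : Nat := adj.foldl (fun m l => max m l.length) 0

def bfs_alt (start : Int) (adj : List (List Int)) (included : Option (List (Int × Bool))) : Int :=
  dfsLoop adj ((pvMaxDeg adj + 1) ^ (adj.length + 1)) [(start, -1, 0)] 0

-- ===== PRECONDITION & SPEC =====
-- neighbours of c other than the parent p (Python indexing semantics, IndexError → [])
def pvChildren (adj : List (List Int)) (c p : Int) : List Int :=
  ((PySem.List.pyGet? adj c).getD []).filter (fun v => !(v == p))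

-- the SET of (node, parent) states at distance k from (start, -1) in the parent-skipping unfolding
def pvFrontier (adj : List (List Int)) (start : Int) : Nat → List (Int × Int)
  | 0 => [(start, -1)]
  | k+1 => PySem.List.dedup
      ((pvFrontier adj start k).flatMap (fun cp => (pvChildren adj cp.1 cp.2).map (fun v => (v, cp.1))))

-- Pre_ excludes (a) inputs whose parent-skipping traversal never terminates — the frontier is still
-- nonempty after adj.length+1 steps — on which A loops forever, and (b) inputs with an adjacency entry
-- outside Python's indexing range for adj, a reachable one of which makes A raise IndexError.  This is a
-- conservative approximation of A's return domain (the problem's own domain is a 0-indexed tree): it also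
-- excludes some inputs on which A returns — out-of-range entries sitting only in unreachable lists, and
-- negative-index/self-loop unfoldings deeper than adj.length — and on those A and B return the SAME value.
def Pre_bfs (start : Int) (adj : List (List Int)) (included : Option (List (Int × Bool))) : Prop :=
  (-(adj.length : Int) ≤ start ∧ start < (adj.length : Int)) ∧
  (∀ l ∈ adj, ∀ v ∈ l, -(adj.length : Int) ≤ v ∧ v < (adj.length : Int)) ∧
  pvFrontier adj start (adj.length + 1) = []

instance (start : Int) (adj : List (List Int)) (included : Option (List (Int × Bool))) : Decidable (Pre_bfs start adj included) := by unfold Pre_bfs; infer_instance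

def pvWitness_bfs : Int × List (List Int) × (Option (List (Int × Bool))) := (0, [[1], [0, 2], [1]], none)

def Spec_bfs (start : Int) (adj : List (List Int)) (included : Option (List (Int × Bool))) (out : Int) : Prop := out = bfs_alt start adj included
instance (start : Int) (adj : List (List Int)) (included : Option (List (Int × Bool))) (out : Int) : Decidable (Spec_bfs start adj included out) := by unfold Spec_bfs; infer_instance

-- ===== CLAIM (what is proved, stated in full; the proofs are below) =====
def Claim_equal_bfs : Prop := ∀ (start : Int) (adj : List (List Int)) (included : Option (List (Int × Bool))), Dom_bfs start adj included → Pre_bfs start adj included → Spec_bfs start adj included (bfs start adj included)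

-- ===== LEMMAS AND PROOFS =====

-- count of even-depth states in the unfolding from (c,p) at depth d, truncated to b more levels
def pvTsum (adj : List (List Int)) : Nat → Int → Int → Nat → Int
  | 0, _, _, _ => 0
  | b+1, c, p, d => (if d % 2 = 0 then 1 else 0) + ((pvChildren adj c p).map (fun v => pvTsum adj b v c (d + 1))).sum

-- number of states in that truncated unfolding
def pvTsize (adj : List (List Int)) : Nat → Int → Int → Nat
  | 0, _, _ => 0
  | b+1, c, p => 1 + ((pvChildren adj c p).map (fun v => pvTsize adj b v c)).sum

theorem bfsKids_go (c p : Int) :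
    ∀ (l : List Int) (acc : List (Int × Int)),
      l.foldl (fun acc v => if v = p then acc else acc ++ [(v, c)]) acc
        = acc ++ (l.filter (fun v => !(v == p))).map (fun v => (v, c)) := by
  intro l
  induction l with
  | nil => simp
  | cons x xs ih =>
    intro acc
    simp only [List.foldl_cons]
    by_cases h : x = p
    · rw [if_pos h, ih]; simp [List.filter_cons, h]
    · rw [if_neg h, ih]; simp [List.filter_cons, h]

theorem bfsKids_eq (adj : List (List Int)) (c p : Int) :
    bfsKids adj c p = (pvChildren adj c p).map (fun v => (v, c)) := by
  unfold bfsKids pvChildren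
  rw [bfsKids_go c p]
  simp

theorem dfsPush_go (c p : Int) (d : Nat) :
    ∀ (l : List Int) (st : List (Int × Int × Nat)),
      l.foldl (fun st v => if v ≠ p then (v, c, d + 1) :: st else st) st
        = ((l.filter (fun v => !(v == p))).map (fun v => (v, c, d + 1))).reverse ++ st := by
  intro l
  induction l with
  | nil => simp
  | cons x xs ih =>
    intro st
    simp only [List.foldl_cons]
    by_cases h : x = p
    · rw [if_neg (by simp [h]), ih]; simp [List.filter_cons, h]
    · rw [if_pos (by simp [h]), ih]; simp [List.filter_cons, h]

-- one BFS level of pvTsum, summed over the whole frontier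
theorem pvTsum_level (adj : List (List Int)) (fuel level : Nat) :
    ∀ (q : List (Int × Int)),
      (q.map (fun cp => pvTsum adj (fuel + 1) cp.1 cp.2 level)).sum
        = (if level % 2 = 0 then (q.length : Int) else 0)
          + (((q.flatMap (fun cp => (pvChildren adj cp.1 cp.2).map (fun v => (v, cp.1)))).map
              (fun cp => pvTsum adj fuel cp.1 cp.2 (level + 1))).sum) := by
  intro q
  induction q with
  | nil => simp
  | cons x xs ih =>
    simp only [List.map_cons, List.sum_cons, List.flatMap_cons, List.map_append, List.sum_append, ih]
    rw [show pvTsum adj (fuel + 1) x.1 x.2 level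
        = (if level % 2 = 0 then 1 else 0) + ((pvChildren adj x.1 x.2).map (fun v => pvTsum adj fuel v x.1 (level + 1))).sum from rfl]
    rw [List.map_map]
    rw [show ((fun cp => pvTsum adj fuel cp.1 cp.2 (level + 1)) ∘ (fun v => (v, x.1)))
        = (fun v => pvTsum adj fuel v x.1 (level + 1)) from rfl]
    split_ifs <;> push_cast [List.length_cons] <;> ring

theorem bfsLoop_eq (adj : List (List Int)) :
    ∀ (fuel : Nat) (q : List (Int × Int)) (count : Int) (level : Nat),
      bfsLoop adj fuel q count level = count + (q.map (fun cp => pvTsum adj fuel cp.1 cp.2 level)).sum := by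
  intro fuel
  induction fuel with
  | zero =>
    intro q count level
    show count = count + (q.map (fun cp => pvTsum adj 0 cp.1 cp.2 level)).sum
    have hz : (q.map (fun cp => pvTsum adj 0 cp.1 cp.2 level)).sum = 0 := by
      induction q <;> simp_all [pvTsum]
    rw [hz]; ring
  | succ f ih =>
    intro q count level
    by_cases hq : q = []
    · simp [hq, bfsLoop]
    · rw [show bfsLoop adj (f + 1) q count level
          = bfsLoop adj f (q.foldl (fun acc cp => acc ++ bfsKids adj cp.1 cp.2) [])
              (if level % 2 = 0 then count + (q.length : Int) else count) (level + 1) from by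
        simp [bfsLoop, List.isEmpty_iff, hq]]
      rw [ih, PySem.List.foldl_append_eq_flatMap, List.nil_append]
      have hk : ∀ cp : Int × Int, bfsKids adj cp.1 cp.2 = (pvChildren adj cp.1 cp.2).map (fun v => (v, cp.1)) :=
        fun cp => bfsKids_eq adj cp.1 cp.2
      simp only [hk]
      rw [pvTsum_level]
      split_ifs <;> ring

-- sums of pointwise-bounded maps
theorem sum_map_le {α : Type} (f g : α → Nat) :
    ∀ (l : List α), (∀ x ∈ l, f x ≤ g x) → (l.map f).sum ≤ (l.map g).sum := by
  intro l
  induction l with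
  | nil => simp
  | cons a as ih =>
    intro h
    simp only [List.map_cons, List.sum_cons]
    have h1 := h a List.mem_cons_self
    have h2 := ih (fun x hx => h x (List.mem_cons_of_mem _ hx))
    omega

-- pointwise ≤ plus equal sums forces pointwise equality (Nat)
theorem sum_eq_pointwise {α : Type} (f g : α → Nat) :
    ∀ (l : List α), (∀ x ∈ l, f x ≤ g x) → (l.map f).sum = (l.map g).sum → ∀ x ∈ l, f x = g x := by
  intro l
  induction l with
  | nil => intro _ _ x hx; cases hx
  | cons a as ih =>
    intro hle hsum x hx
    have h1 : (as.map f).sum ≤ (as.map g).sum :=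
      sum_map_le f g as (fun y hy => hle y (List.mem_cons_of_mem _ hy))
    have h2 : f a ≤ g a := hle a List.mem_cons_self
    simp only [List.map_cons, List.sum_cons] at hsum
    rcases List.mem_cons.mp hx with h | hx
    · subst h; omega
    · exact ih (fun y hy => hle y (List.mem_cons_of_mem _ hy)) (by omega) x hx

theorem pvTsize_mono_succ (adj : List (List Int)) :
    ∀ (b : Nat) (c p : Int), pvTsize adj b c p ≤ pvTsize adj (b + 1) c p := by
  intro b
  induction b with
  | zero => intro c p; simp [pvTsize]
  | succ b ih =>
    intro c p
    show 1 + _ ≤ 1 + _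
    have h := sum_map_le (fun v => pvTsize adj b v c) (fun v => pvTsize adj (b + 1) v c)
      (pvChildren adj c p) (fun v _ => ih v c)
    omega

-- stability of pvTsize propagates to the children with one budget less
theorem stab_child (adj : List (List Int)) (b : Nat) (c p : Int)
    (h : pvTsize adj (b + 1) c p = pvTsize adj (b + 2) c p) :
    ∀ v ∈ pvChildren adj c p, pvTsize adj b v c = pvTsize adj (b + 1) v c := by
  have hs : ((pvChildren adj c p).map (fun v => pvTsize adj b v c)).sum
      = ((pvChildren adj c p).map (fun v => pvTsize adj (b + 1) v c)).sum := by
    have h1 : (1 : Nat) + ((pvChildren adj c p).map (fun v => pvTsize adj b v c)).sum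
        = 1 + ((pvChildren adj c p).map (fun v => pvTsize adj (b + 1) v c)).sum := h
    omega
  exact sum_eq_pointwise _ _ _ (fun v _ => pvTsize_mono_succ adj b v c) hs

theorem stab_ne_zero (adj : List (List Int)) (b : Nat) (c p : Int)
    (h : pvTsize adj b c p = pvTsize adj (b + 1) c p) : b ≠ 0 := by
  intro h0
  subst h0
  have h1 : pvTsize adj 0 c p = 0 := rfl
  have h2 : pvTsize adj (0 + 1) c p = 1 + ((pvChildren adj c p).map (fun v => pvTsize adj 0 v c)).sum := rfl
  omega

theorem dfsLoop_eq (adj : List (List Int)) :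
    ∀ (fuel : Nat) (L : List (Nat × Int × Int × Nat)) (count : Int),
      (∀ x ∈ L, pvTsize adj x.1 x.2.1 x.2.2.1 = pvTsize adj (x.1 + 1) x.2.1 x.2.2.1) →
      (L.map (fun x => pvTsize adj x.1 x.2.1 x.2.2.1)).sum ≤ fuel →
      dfsLoop adj fuel (L.map (fun x => (x.2.1, x.2.2.1, x.2.2.2))) count
        = count + (L.map (fun x => pvTsum adj x.1 x.2.1 x.2.2.1 x.2.2.2)).sum := by
  intro fuel
  induction fuel with
  | zero =>
    intro L count hstab hsum
    cases L with
    | nil => simp [dfsLoop]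
    | cons x rest =>
      exfalso
      obtain ⟨b', hb'⟩ := Nat.exists_eq_succ_of_ne_zero
        (stab_ne_zero adj x.1 x.2.1 x.2.2.1 (hstab x List.mem_cons_self))
      have h1 : 1 ≤ pvTsize adj x.1 x.2.1 x.2.2.1 := by
        rw [hb']; show 1 ≤ 1 + _; omega
      simp only [List.map_cons, List.sum_cons] at hsum
      omega
  | succ f ih =>
    intro L count hstab hsum
    cases L with
    | nil => simp [dfsLoop]
    | cons x rest =>
      obtain ⟨b, c, p, d⟩ := x
      have hstabx := hstab (b, c, p, d) List.mem_cons_self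
      obtain ⟨b', rfl⟩ := Nat.exists_eq_succ_of_ne_zero (stab_ne_zero adj b c p hstabx)
      have hstep : dfsLoop adj (f + 1) (((b' + 1, c, p, d) :: rest).map (fun x => (x.2.1, x.2.2.1, x.2.2.2))) count
          = dfsLoop adj f
              (((PySem.List.pyGet? adj c).getD []).foldl
                (fun st v => if v ≠ p then (v, c, d + 1) :: st else st)
                (rest.map (fun x => (x.2.1, x.2.2.1, x.2.2.2))))
              (if d % 2 = 0 then count + 1 else count) := rfl
      rw [hstep, dfsPush_go c p d]
      have hch : List.filter (fun v => !(v == p)) ((PySem.List.pyGet? adj c).getD []) = pvChildren adj c p := rfl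
      rw [hch]
      have hstack : ((pvChildren adj c p).map (fun v => (v, c, d + 1))).reverse
            ++ rest.map (fun x => (x.2.1, x.2.2.1, x.2.2.2))
          = (((pvChildren adj c p).reverse.map (fun v => (b', v, c, d + 1))) ++ rest).map
              (fun x => (x.2.1, x.2.2.1, x.2.2.2)) := by
        simp [List.map_map, Function.comp]
      rw [hstack]
      have hstab' : ∀ x ∈ ((pvChildren adj c p).reverse.map (fun v => (b', v, c, d + 1))) ++ rest,
          pvTsize adj x.1 x.2.1 x.2.2.1 = pvTsize adj (x.1 + 1) x.2.1 x.2.2.1 := by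
        intro x hx
        rcases List.mem_append.mp hx with hx | hx
        · obtain ⟨v, hv, rfl⟩ := List.mem_map.mp hx
          exact stab_child adj b' c p hstabx v (List.mem_reverse.mp hv)
        · exact hstab x (List.mem_cons_of_mem _ hx)
      have hsz : pvTsize adj (b' + 1) c p
          = 1 + ((pvChildren adj c p).map (fun v => pvTsize adj b' v c)).sum := rfl
      have hrevsz : (((pvChildren adj c p).reverse.map (fun v => (b', v, c, d + 1))).map
            (fun x => pvTsize adj x.1 x.2.1 x.2.2.1)).sum
          = ((pvChildren adj c p).map (fun v => pvTsize adj b' v c)).sum := by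
        rw [List.map_map]
        rw [show ((fun x : Nat × Int × Int × Nat => pvTsize adj x.1 x.2.1 x.2.2.1) ∘ (fun v => (b', v, c, d + 1)))
            = (fun v => pvTsize adj b' v c) from rfl]
        simp [List.sum_reverse]
      have hsum' : ((((pvChildren adj c p).reverse.map (fun v => (b', v, c, d + 1))) ++ rest).map
            (fun x => pvTsize adj x.1 x.2.1 x.2.2.1)).sum ≤ f := by
        simp only [List.map_append, List.sum_append, hrevsz]
        simp only [List.map_cons, List.sum_cons, hsz] at hsum
        omega
      rw [ih _ _ hstab' hsum']
      have hrevsum : (((pvChildren adj c p).reverse.map (fun v => (b', v, c, d + 1))).map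
            (fun x => pvTsum adj x.1 x.2.1 x.2.2.1 x.2.2.2)).sum
          = ((pvChildren adj c p).map (fun v => pvTsum adj b' v c (d + 1))).sum := by
        rw [List.map_map]
        rw [show ((fun x : Nat × Int × Int × Nat => pvTsum adj x.1 x.2.1 x.2.2.1 x.2.2.2) ∘ (fun v => (b', v, c, d + 1)))
            = (fun v => pvTsum adj b' v c (d + 1)) from rfl]
        simp [List.sum_reverse]
      have hts : pvTsum adj (b' + 1) c p d
          = (if d % 2 = 0 then 1 else 0) + ((pvChildren adj c p).map (fun v => pvTsum adj b' v c (d + 1))).sum := rfl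
      simp only [List.map_append, List.sum_append, List.map_cons, List.sum_cons, hrevsum, hts]
      split_ifs <;> ring

theorem foldl_max_le (adj : List (List Int)) :
    ∀ (init : Nat), init ≤ adj.foldl (fun m l => max m l.length) init
      ∧ ∀ l ∈ adj, l.length ≤ adj.foldl (fun m l => max m l.length) init := by
  induction adj with
  | nil => intro init; simp
  | cons a as ih =>
    intro init
    simp only [List.foldl_cons]
    constructor
    · exact le_trans (le_max_left _ _) (ih (max init a.length)).1
    · intro l hl
      rcases List.mem_cons.mp hl with rfl | hl
      · exact le_trans (le_max_right _ _) (ih (max init l.length)).1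
      · exact (ih (max init a.length)).2 l hl

theorem deg_le (adj : List (List Int)) (c : Int) :
    ((PySem.List.pyGet? adj c).getD []).length ≤ pvMaxDeg adj := by
  cases h : PySem.List.pyGet? adj c with
  | none => simp
  | some l =>
    simp only [Option.getD_some]
    exact (foldl_max_le adj 0).2 l (PySem.List.mem_of_pyGet?_eq_some adj h)

theorem sum_le_length_mul {α : Type} (f : α → Nat) (n : Nat) :
    ∀ (l : List α), (∀ x ∈ l, f x ≤ n) → (l.map f).sum ≤ l.length * n := by
  intro l
  induction l with
  | nil => simp
  | cons a as ih =>
    intro h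
    simp only [List.map_cons, List.sum_cons, List.length_cons]
    have h1 := h a List.mem_cons_self
    have h2 := ih (fun x hx => h x (List.mem_cons_of_mem _ hx))
    have : (as.length + 1) * n = as.length * n + n := by ring
    omega

theorem pvTsize_le_pow (adj : List (List Int)) :
    ∀ (b : Nat) (c p : Int), pvTsize adj b c p ≤ (pvMaxDeg adj + 1) ^ b := by
  intro b
  induction b with
  | zero => intro c p; simp [pvTsize]
  | succ b ih =>
    intro c p
    show 1 + ((pvChildren adj c p).map (fun v => pvTsize adj b v c)).sum ≤ _
    have hlen : (pvChildren adj c p).length ≤ pvMaxDeg adj :=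
      le_trans (List.length_filter_le _ _) (deg_le adj c)
    have hsum : ((pvChildren adj c p).map (fun v => pvTsize adj b v c)).sum
        ≤ (pvChildren adj c p).length * (pvMaxDeg adj + 1) ^ b :=
      sum_le_length_mul _ _ _ (fun v _ => ih v c)
    have h1 : 1 ≤ (pvMaxDeg adj + 1) ^ b := Nat.one_le_pow _ _ (by omega)
    have hpow : (pvMaxDeg adj + 1) ^ (b + 1)
        = (pvMaxDeg adj + 1) ^ b + pvMaxDeg adj * (pvMaxDeg adj + 1) ^ b := by ring
    have hmul : (pvChildren adj c p).length * (pvMaxDeg adj + 1) ^ b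
        ≤ pvMaxDeg adj * (pvMaxDeg adj + 1) ^ b := Nat.mul_le_mul_right _ hlen
    omega

-- a chain of parent-skipping steps: v ∈ children(c,p), then onward from (v,c)
def pvChain (adj : List (List Int)) : Int → Int → List Int → Prop
  | _, _, [] => True
  | c, p, v :: vs => v ∈ pvChildren adj c p ∧ pvChain adj v c vs

-- a budget at which pvTsize is not yet stable yields a chain of that length
theorem descent (adj : List (List Int)) :
    ∀ (b : Nat) (c p : Int), pvTsize adj b c p ≠ pvTsize adj (b + 1) c p →
      ∃ vs : List Int, vs.length = b ∧ pvChain adj c p vs := by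
  intro b
  induction b with
  | zero => intro c p _; exact ⟨[], rfl, trivial⟩
  | succ b ih =>
    intro c p hne
    have hsne : ((pvChildren adj c p).map (fun v => pvTsize adj b v c)).sum
        ≠ ((pvChildren adj c p).map (fun v => pvTsize adj (b + 1) v c)).sum := by
      intro he
      apply hne
      show 1 + _ = 1 + _
      omega
    have hex : ∃ v ∈ pvChildren adj c p, pvTsize adj b v c ≠ pvTsize adj (b + 1) v c := by
      by_contra hall
      push_neg at hall
      exact hsne (by rw [List.map_congr_left (fun v hv => hall v hv)])
    obtain ⟨v, hv, hvne⟩ := hex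
    obtain ⟨vs, hl, hc⟩ := ih v c hvne
    exact ⟨v :: vs, by simp [hl], ⟨hv, hc⟩⟩

theorem chain_frontier (adj : List (List Int)) (start : Int) :
    ∀ (vs : List Int) (c p : Int) (k : Nat), pvChain adj c p vs →
      (c, p) ∈ pvFrontier adj start k →
      ∃ st, st ∈ pvFrontier adj start (k + vs.length) := by
  intro vs
  induction vs with
  | nil => intro c p k _ h; exact ⟨(c, p), by simpa using h⟩
  | cons v vs ih =>
    intro c p k hch hmem
    have hch' : v ∈ pvChildren adj c p ∧ pvChain adj v c vs := hch
    have hnext : (v, c) ∈ pvFrontier adj start (k + 1) := by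
      show (v, c) ∈ PySem.List.dedup _
      rw [PySem.List.mem_dedup]
      exact List.mem_flatMap.mpr ⟨(c, p), hmem, List.mem_map.mpr ⟨v, hch'.1, rfl⟩⟩
    obtain ⟨st, hst⟩ := ih v c (k + 1) hch'.2 hnext
    refine ⟨st, ?_⟩
    have heq : k + (v :: vs).length = k + 1 + vs.length := by
      simp only [List.length_cons]
      omega
    rw [heq]
    exact hst

theorem stability_root (start : Int) (adj : List (List Int))
    (h : pvFrontier adj start (adj.length + 1) = []) :
    pvTsize adj (adj.length + 1) start (-1) = pvTsize adj (adj.length + 2) start (-1) := by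
  by_contra hne
  obtain ⟨vs, hlen, hchain⟩ := descent adj (adj.length + 1) start (-1) hne
  obtain ⟨st, hst⟩ := chain_frontier adj start vs start (-1) 0 hchain (by simp [pvFrontier])
  rw [show 0 + vs.length = adj.length + 1 by omega] at hst
  rw [h] at hst
  exact List.not_mem_nil hst

-- ===== VERDICT (by name: the statement is the Claim_ definition above) =====
theorem bfs_spec : Claim_equal_bfs := by
  intro start adj included _hdom hpre
  obtain ⟨_, _, hfr⟩ := hpre
  show bfs start adj included = bfs_alt start adj included
  have hA : bfs start adj included = pvTsum adj (adj.length + 1) start (-1) 0 := by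
    rw [bfs, bfsLoop_eq]; simp
  have hB : bfs_alt start adj included = pvTsum adj (adj.length + 1) start (-1) 0 := by
    rw [bfs_alt]
    have hd := dfsLoop_eq adj ((pvMaxDeg adj + 1) ^ (adj.length + 1)) [(adj.length + 1, start, -1, 0)] 0
      (by
        intro x hx
        have hx' := List.mem_singleton.mp hx
        subst hx'
        exact stability_root start adj hfr)
      (by simpa using pvTsize_le_pow adj (adj.length + 1) start (-1))
    simpa using hd
  rw [hA, hB]
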